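-- pv_equiv track=rewrite | github.com/Darwin1401/LTTT | baocaodoan.py | is_right_linear_grammar
-- ===== SOURCE A (Python) =====
-- def is_right_linear_grammar(Variables, Production): # Kiem tra tuyen tinh phai
--     for item in Production:
--         for value in item.values():
--             if value != "Epsilon":
--                 for i in value:
--                     if i in Variables:
--                         if value[-1] != i or i in value[:-1]:
--                             return False
--     return True
-- ===== SOURCE B (Python) =====
-- def is_right_linear_grammar(Variables, Production):
--     # Right-linear iff no (single-character) variable occurs before the last
--     # position of any non-Epsilon production body.  Stage 1 collects the
--     # prefixes value[:-1]; stage 2 searches each variable in those prefixes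
--     # by substring search, iterating the variables instead of the characters.
--     prefixes = [value[:-1] for item in Production
--                 for value in item.values() if value != "Epsilon"]
--     for v in Variables:
--         if len(v) == 1:
--             for p in prefixes:
--                 if v in p:
--                     return False
--     return True
-- ===== Notes on version B (the rewrite author's own statement) =====
-- stated objective: faster
-- what changed: Inverts the iteration: instead of scanning each body character by character, rebuilding value[:-1] for every character, B collects all prefixes value[:-1] in one staged pass and then loops over the Variables, locating each single-character variable in the prefixes by substring search.
import Mathlib
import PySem

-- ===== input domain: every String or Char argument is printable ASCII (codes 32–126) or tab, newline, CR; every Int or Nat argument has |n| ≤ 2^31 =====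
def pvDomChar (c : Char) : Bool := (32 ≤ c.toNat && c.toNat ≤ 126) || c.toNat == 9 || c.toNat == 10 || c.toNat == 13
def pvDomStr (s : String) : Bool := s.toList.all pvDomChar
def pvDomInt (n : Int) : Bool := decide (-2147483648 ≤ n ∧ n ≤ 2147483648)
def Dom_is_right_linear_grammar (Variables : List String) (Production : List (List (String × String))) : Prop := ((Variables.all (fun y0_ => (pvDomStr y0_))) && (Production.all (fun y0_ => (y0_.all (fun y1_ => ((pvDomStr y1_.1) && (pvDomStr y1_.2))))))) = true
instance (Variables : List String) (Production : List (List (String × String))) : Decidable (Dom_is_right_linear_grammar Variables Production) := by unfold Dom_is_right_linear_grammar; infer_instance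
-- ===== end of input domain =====

-- B inverts A's iteration: it first collects the prefixes value[:-1] of all non-Epsilon bodies,
-- then searches each single-character variable in those prefixes by substring search
-- (objective: faster, measured — A re-slices value[:-1] per character).

-- ===== PORT A =====
-- literal port of A: nested loops with early return become short-circuiting `all`s
def is_right_linear_grammar (Variables : List String) (Production : List (List (String × String))) : Bool :=
  Production.all fun item =>
    ((PySem.Dict.ofList item).values).all fun value =>
      if value ≠ "Epsilon" then
        value.toList.all fun i =>
          if Variables.contains (String.ofList [i]) then
            if PySem.List.pyGet? value.toList (-1) ≠ some i
                || (PySem.List.slice value.toList none (some (-1))).contains i then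
              false
            else true
          else true
      else true

-- ===== PORT B =====
-- stage 1: the list comprehension of prefixes value[:-1]; stage 2: loop over Variables with substring search
def is_right_linear_grammar_alt (Variables : List String) (Production : List (List (String × String))) : Bool :=
  let prefixes : List (List Char) :=
    Production.flatMap fun item =>
      ((PySem.Dict.ofList item).values).filterMap fun value =>
        if value ≠ "Epsilon" then some (PySem.List.slice value.toList none (some (-1))) else none
  Variables.all fun v =>
    if v.toList.length = 1 then
      prefixes.all fun p => !(PySem.Chars.isIn v.toList p)
    else true

-- ===== PRECONDITION & SPEC =====
def Spec_is_right_linear_grammar (Variables : List String) (Production : List (List (String × String))) (out : Bool) : Prop := out = is_right_linear_grammar_alt Variables Production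
instance (Variables : List String) (Production : List (List (String × String))) (out : Bool) : Decidable (Spec_is_right_linear_grammar Variables Production out) := by unfold Spec_is_right_linear_grammar; infer_instance

-- ===== CLAIM =====
def Claim_equal_is_right_linear_grammar : Prop := ∀ (Variables : List String) (Production : List (List (String × String))), Dom_is_right_linear_grammar Variables Production → Spec_is_right_linear_grammar Variables Production (is_right_linear_grammar Variables Production)

-- ===== LEMMAS AND PROOFS =====

-- core fact about A: its per-character test over the whole word equals
-- "no character of value[:-1] satisfies the variable-membership predicate"
theorem per_value_eq (memP : Char → Bool) (l : List Char) :
    (l.all fun i =>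
      if memP i then
        if PySem.List.pyGet? l (-1) ≠ some i
            || (PySem.List.slice l none (some (-1))).contains i then
          false
        else true
      else true)
    = (PySem.List.slice l none (some (-1))).all fun c => !(memP c) := by
  rcases List.eq_nil_or_concat l with rfl | ⟨l', x, rfl⟩
  · simp [PySem.List.slice_to_neg_one]
  · simp only [List.concat_eq_append]
    have hget : PySem.List.pyGet? (l' ++ [x]) (-1) = some x := by simp [pysem]
    have hsl : PySem.List.slice (l' ++ [x]) none (some (-1)) = l' := by
      simp [PySem.List.slice_to_neg_one]
    rw [hget, hsl]
    by_cases h : l'.all (fun c => !(memP c))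
    · simp only [h]
      rw [List.all_append]
      have h' : ∀ c ∈ l', memP c = false := by
        intro c hc
        have := List.all_eq_true.mp h c hc
        simpa using this
      have hl' : (l'.all fun i =>
          if memP i then
            if (some x ≠ some i) || l'.contains i then false else true
          else true) = true := by
        refine List.all_eq_true.mpr fun c hc => ?_
        simp [h' c hc]
      rw [hl']
      simp only [Bool.true_and, List.all_cons, List.all_nil, Bool.and_true]
      by_cases hx : memP x
      · have hxm : x ∉ l' := by
          intro hm
          have := h' x hm
          simp [hx] at this
        simp [hx, hxm]
      · simp [hx]
    · have : ∃ c ∈ l', memP c = true := by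
        by_contra hc
        push Not at hc
        exact h (List.all_eq_true.mpr fun c hcmem => by
          have := hc c hcmem
          simp [this])
      obtain ⟨c, hcmem, hcP⟩ := this
      have hr : (l'.all fun c => !(memP c)) = false := by
        by_contra hcon
        have := List.all_eq_true.mp (Bool.of_not_eq_false hcon) c hcmem
        simp [hcP] at this
      rw [hr]
      refine List.all_eq_false.mpr ⟨c, List.mem_append_left _ hcmem, ?_⟩
      simp [hcP]
      exact fun _ => hcmem

-- A's result characterised as a Prop
theorem A_iff (Variables : List String) (Production : List (List (String × String))) :
    is_right_linear_grammar Variables Production = true ↔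
      ∀ item ∈ Production, ∀ value ∈ (PySem.Dict.ofList item).values,
        value ≠ "Epsilon" → ∀ c ∈ value.toList.dropLast, String.ofList [c] ∉ Variables := by
  unfold is_right_linear_grammar
  simp only [List.all_eq_true]
  refine forall_congr' fun item => forall_congr' fun _ =>
    forall_congr' fun value => forall_congr' fun _ => ?_
  by_cases hv : value = "Epsilon"
  · simp [hv]
  · simp only [hv, ne_eq, not_false_iff, if_true]
    rw [per_value_eq (fun c => Variables.contains (String.ofList [c]))]
    simp [PySem.List.slice_to_neg_one, List.all_eq_true]

-- B's result characterised as a Prop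
theorem B_iff (Variables : List String) (Production : List (List (String × String))) :
    is_right_linear_grammar_alt Variables Production = true ↔
      ∀ v ∈ Variables, v.toList.length = 1 →
        ∀ item ∈ Production, ∀ value ∈ (PySem.Dict.ofList item).values,
          value ≠ "Epsilon" → ¬ (v.toList <:+: value.toList.dropLast) := by
  unfold is_right_linear_grammar_alt
  simp only [List.all_eq_true]
  refine forall_congr' fun v => forall_congr' fun _ => ?_
  by_cases hl : v.toList.length = 1
  · rw [if_pos hl]
    simp only [List.all_eq_true]
    constructor
    · intro h _ item hitem value hvalue hne hinf
      have hp := h value.toList.dropLast (List.mem_flatMap.mpr ⟨item, hitem,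
        List.mem_filterMap.mpr ⟨value, hvalue, by
          rw [if_pos hne, PySem.List.slice_to_neg_one]⟩⟩)
      rw [Bool.not_eq_true', PySem.Chars.isIn_eq_false_iff] at hp
      exact hp hinf
    · intro h p hp
      rw [List.mem_flatMap] at hp
      obtain ⟨item, hitem, hp⟩ := hp
      rw [List.mem_filterMap] at hp
      obtain ⟨value, hvalue, hopt⟩ := hp
      by_cases hne : value = "Epsilon"
      · rw [if_neg (by simp [hne])] at hopt
        exact absurd hopt (by simp)
      · rw [if_pos hne] at hopt
        injection hopt with hopt
        subst hopt
        rw [PySem.List.slice_to_neg_one, Bool.not_eq_true', PySem.Chars.isIn_eq_false_iff]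
        exact h hl item hitem value hvalue hne
  · rw [if_neg hl]
    exact ⟨fun _ h1 => (hl h1).elim, fun _ => rfl⟩

-- a single character is an infix of l iff it is a member of l
theorem singleton_infix_iff_mem {α : Type} (c : α) (l : List α) : [c] <:+: l ↔ c ∈ l := by
  constructor
  · intro h; exact h.subset (List.mem_singleton_self c)
  · intro h
    obtain ⟨s, t, rfl⟩ := List.append_of_mem h
    exact ⟨s, t, by simp⟩

-- ===== VERDICT =====
theorem is_right_linear_grammar_spec : Claim_equal_is_right_linear_grammar := by
  intro Variables Production _
  unfold Spec_is_right_linear_grammar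
  rw [Bool.eq_iff_iff, A_iff, B_iff]
  constructor
  · intro h v hv hlen item hitem value hvalue hne hinf
    obtain ⟨c, hc⟩ := List.length_eq_one_iff.mp hlen
    rw [hc, singleton_infix_iff_mem] at hinf
    have := h item hitem value hvalue hne c hinf
    apply this
    have : String.ofList v.toList = v := by simp
    rw [hc] at this
    rwa [this]
  · intro h item hitem value hvalue hne c hc hmem
    have hlen : (String.ofList [c]).toList.length = 1 := by simp
    have hinf : (String.ofList [c]).toList <:+: value.toList.dropLast := by
      rw [show (String.ofList [c]).toList = [c] by simp, singleton_infix_iff_mem]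
      exact hc
    exact h (String.ofList [c]) hmem hlen item hitem value hvalue hne hinf
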